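-- pv_equiv track=rewrite | github.com/zhanghongjia1116/flatness | 异常板形监测溯源/utils/MXL_Support.py | cal_acc_TE2
-- ===== SOURCE A (Python) =====
-- def cal_acc_TE2(T2_unfiy_value, T2limit_unfiy):
--     TT = 0
--     TF = 0
--     FT = 0
--     FF = 0
--     for i in range(len(T2_unfiy_value)):
--         if i > 160:
--             if T2_unfiy_value[i] > T2limit_unfiy:
--                 FF += 1
--             else:
--                 FT += 1
--         else:
--             if T2_unfiy_value[i] > T2limit_unfiy:
--                 TF += 1
--             else:
--                 TT += 1
--
--     return TT, TF, FT, FF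
-- ===== SOURCE B (Python) =====
-- def _count_above(part, lim):
--     # sort, then binary-search the first index whose value exceeds lim
--     s = sorted(part)
--     lo, hi = 0, len(s)
--     while lo < hi:
--         mid = (lo + hi) // 2
--         if s[mid] > lim:
--             hi = mid
--         else:
--             lo = mid + 1
--     return len(s) - lo
--
--
-- def cal_acc_TE2(T2_unfiy_value, T2limit_unfiy):
--     first = T2_unfiy_value[:161]
--     second = T2_unfiy_value[161:]
--     TF = _count_above(first, T2limit_unfiy)
--     FF = _count_above(second, T2limit_unfiy)
--     return len(first) - TF, TF, len(second) - FF, FF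
-- ===== Notes on version B (the rewrite author's own statement) =====
-- stated objective: alternative
-- what changed: Replaces the four-way indexed counting loop by a sort-then-binary-search algorithm: each index slice (split at 161) is sorted and the above-threshold count is found by binary-searching the boundary in the sorted copy; the <=-threshold counts are the arithmetic complements.
import Mathlib
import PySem

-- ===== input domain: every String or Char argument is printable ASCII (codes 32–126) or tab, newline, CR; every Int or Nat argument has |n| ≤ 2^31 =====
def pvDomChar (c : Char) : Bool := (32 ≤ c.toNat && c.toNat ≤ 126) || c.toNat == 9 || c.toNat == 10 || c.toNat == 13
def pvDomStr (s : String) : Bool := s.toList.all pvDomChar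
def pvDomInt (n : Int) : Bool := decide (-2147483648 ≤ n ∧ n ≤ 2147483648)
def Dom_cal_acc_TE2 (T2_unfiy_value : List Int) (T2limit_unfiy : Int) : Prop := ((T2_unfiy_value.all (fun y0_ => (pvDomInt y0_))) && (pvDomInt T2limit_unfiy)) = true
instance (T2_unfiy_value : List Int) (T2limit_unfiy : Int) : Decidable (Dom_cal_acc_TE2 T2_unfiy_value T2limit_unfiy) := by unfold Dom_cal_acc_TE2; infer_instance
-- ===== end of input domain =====

-- B replaces A's four-way indexed counting loop by sort + hand-written binary search
-- of the above-threshold boundary in each index slice (split at 161), with arithmetic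
-- complements for the <=-threshold counts (alternative algorithm, not claimed faster).


-- ===== PORT A =====
-- A's `for i in range(len(xs))` with xs[i]: structural recursion over the list
-- carrying the running index i and the four counters, branches in A's order.
def calAccLoop (xs : List Int) (lim : Int) (i : Nat) (TT TF FT FF : Int) :
    Int × Int × Int × Int :=
  match xs with
  | [] => (TT, TF, FT, FF)
  | v :: rest =>
    if i > 160 then
      if v > lim then calAccLoop rest lim (i + 1) TT TF FT (FF + 1)
      else calAccLoop rest lim (i + 1) TT TF (FT + 1) FF
    else
      if v > lim then calAccLoop rest lim (i + 1) TT (TF + 1) FT FF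
      else calAccLoop rest lim (i + 1) (TT + 1) TF FT FF

def cal_acc_TE2 (T2_unfiy_value : List Int) (T2limit_unfiy : Int) : Int × Int × Int × Int :=
  calAccLoop T2_unfiy_value T2limit_unfiy 0 0 0 0 0

-- ===== PORT B =====
-- Source B's `while lo < hi` binary search; s[mid] is ported as getD mid 0, exact here
-- because the loop keeps lo ≤ mid < hi ≤ len(s), so the index is always in range.
def bsLoop (s : List Int) (lim : Int) (lo hi : Nat) : Nat :=
  if lo < hi then
    let mid := (lo + hi) / 2
    if s.getD mid 0 > lim then bsLoop s lim lo mid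
    else bsLoop s lim (mid + 1) hi
  else lo
termination_by hi - lo
decreasing_by all_goals omega

-- Source B's _count_above: sort the slice, binary-search the first index above lim
def countAbove (part : List Int) (lim : Int) : Int :=
  let s := PySem.List.sorted part (fun x => x) false
  let lo := bsLoop s lim 0 s.length
  (s.length : Int) - (lo : Int)

def cal_acc_TE2_alt (T2_unfiy_value : List Int) (T2limit_unfiy : Int) : Int × Int × Int × Int :=
  let first := T2_unfiy_value.take 161
  let second := T2_unfiy_value.drop 161
  let TF := countAbove first T2limit_unfiy
  let FF := countAbove second T2limit_unfiy
  ((first.length : Int) - TF, TF, (second.length : Int) - FF, FF)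

-- ===== PRECONDITION & SPEC =====
def Spec_cal_acc_TE2 (T2_unfiy_value : List Int) (T2limit_unfiy : Int) (out : Int × Int × Int × Int) : Prop := out = cal_acc_TE2_alt T2_unfiy_value T2limit_unfiy
instance (T2_unfiy_value : List Int) (T2limit_unfiy : Int) (out : Int × Int × Int × Int) : Decidable (Spec_cal_acc_TE2 T2_unfiy_value T2limit_unfiy out) := by unfold Spec_cal_acc_TE2; infer_instance

-- ===== CLAIM =====
def Claim_equal_cal_acc_TE2 : Prop := ∀ (T2_unfiy_value : List Int) (T2limit_unfiy : Int), Dom_cal_acc_TE2 T2_unfiy_value T2limit_unfiy → Spec_cal_acc_TE2 T2_unfiy_value T2limit_unfiy (cal_acc_TE2 T2_unfiy_value T2limit_unfiy)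

-- ===== LEMMAS AND PROOFS =====

-- A's loop, started at index i, counts the ≤/> lim split of the first
-- (161 - i) remaining elements into (TT, TF) and of the rest into (FT, FF).
lemma calAccLoop_eq (xs : List Int) (lim : Int) (i : Nat) (TT TF FT FF : Int) :
    calAccLoop xs lim i TT TF FT FF =
      (TT + ((xs.take (161 - i)).filter (fun v => !(v > lim))).length,
       TF + ((xs.take (161 - i)).filter (fun v => v > lim)).length,
       FT + ((xs.drop (161 - i)).filter (fun v => !(v > lim))).length,
       FF + ((xs.drop (161 - i)).filter (fun v => v > lim)).length) := by
  induction xs generalizing i TT TF FT FF with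
  | nil => simp [calAccLoop]
  | cons v rest ih =>
    by_cases hi : i > 160
    · have h0 : 161 - i = 0 := by omega
      have h1 : 161 - (i + 1) = 0 := by omega
      by_cases hv : v > lim <;>
        (simp [calAccLoop, hi, hv, h0, ih, h1]; ring_nf)
    · have h0 : 161 - i = (161 - (i + 1)) + 1 := by omega
      by_cases hv : v > lim <;>
        simp [calAccLoop, hi, hv, h0, ih] <;> ring_nf

lemma length_filter_split {α : Type} (p : α → Bool) (xs : List α) :
    (xs.filter (fun v => !(p v))).length =
      xs.length - (xs.filter p).length := by
  induction xs with
  | nil => simp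
  | cons v rest ih =>
    have := List.length_filter_le p rest
    by_cases hv : p v <;> simp [hv, ih] <;> omega

-- a boundary index r (everything before ≤ lim, everything from r on > lim)
-- pins down the count of ≤-lim elements
lemma countP_eq_of_boundary (s : List Int) (lim : Int) (r : Nat) (hr : r ≤ s.length)
    (h1 : ∀ i, i < r → s.getD i 0 ≤ lim)
    (h2 : ∀ i, r ≤ i → i < s.length → lim < s.getD i 0) :
    s.countP (fun v => decide (v ≤ lim)) = r := by
  induction s generalizing r with
  | nil => simp only [List.length_nil, Nat.le_zero] at hr; simp [hr]
  | cons v t ih =>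
    cases r with
    | zero =>
      have hv : lim < v := by simpa using h2 0 (by omega) (by simp)
      have ht : t.countP (fun v => decide (v ≤ lim)) = 0 := by
        apply ih 0 (by omega) (by omega)
        intro i _ hi
        simpa using h2 (i + 1) (by omega) (by simpa using hi)
      simp [ht, not_le.mpr hv]
    | succ r' =>
      have hv : v ≤ lim := by simpa using h1 0 (by omega)
      have ht : t.countP (fun v => decide (v ≤ lim)) = r' := by
        apply ih r' (by simp at hr; omega)
        · intro i hi; simpa using h1 (i + 1) (by omega)
        · intro i hi hi'; simpa using h2 (i + 1) (by omega) (by simpa using hi')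
      simp [ht, hv]

-- the binary search on a (getD-)monotone list returns the ≤-lim count
lemma bsLoop_eq (s : List Int) (lim : Int)
    (hmono : ∀ p q, p ≤ q → q < s.length → s.getD p 0 ≤ s.getD q 0) :
    ∀ (k lo hi : Nat), hi - lo = k → lo ≤ hi → hi ≤ s.length →
    (∀ i, i < lo → s.getD i 0 ≤ lim) →
    (∀ i, hi ≤ i → i < s.length → lim < s.getD i 0) →
    bsLoop s lim lo hi = s.countP (fun v => decide (v ≤ lim)) := by
  intro k
  induction k using Nat.strong_induction_on with
  | _ k ih =>
    intro lo hi hk hlohi hhis hlow hhigh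
    rw [bsLoop]
    by_cases h : lo < hi
    · simp only [h, if_true]
      by_cases hm : s.getD ((lo + hi) / 2) 0 > lim
      · simp only [hm, if_true]
        apply ih (((lo + hi) / 2) - lo) (by omega) lo _ rfl (by omega) (by omega) hlow
        intro i hi1 hi2
        exact lt_of_lt_of_le hm (hmono _ _ hi1 hi2)
      · simp only [hm, if_false]
        apply ih (hi - ((lo + hi) / 2 + 1)) (by omega) _ hi rfl (by omega) hhis _ hhigh
        intro i hi1
        have hmle : s.getD i 0 ≤ s.getD ((lo + hi) / 2) 0 :=
          hmono _ _ (by omega) (by omega)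
        omega
    · simp only [h, if_false]
      have : lo = hi := by omega
      subst this
      exact (countP_eq_of_boundary s lim lo hhis hlow
        (fun i h1 h2 => hhigh i h1 h2)).symm

-- countAbove part lim computes the number of elements of part strictly above lim
lemma countAbove_eq (part : List Int) (lim : Int) :
    countAbove part lim = ((part.filter (fun v => v > lim)).length : Int) := by
  unfold countAbove
  dsimp only
  set s := PySem.List.sorted part (fun x => x) false with hs
  have hperm : s.Perm part := PySem.List.sorted_perm part (fun x => x) false
  have hpw : s.Pairwise (fun a b => a ≤ b) := by
    simpa using PySem.List.sorted_pairwise part (fun x => x)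
  have hmono : ∀ p q, p ≤ q → q < s.length → s.getD p 0 ≤ s.getD q 0 := by
    intro p q hpq hq
    have hp : p < s.length := by omega
    rw [List.getD_eq_getElem s 0 hp, List.getD_eq_getElem s 0 hq]
    rcases Nat.eq_or_lt_of_le hpq with h | h
    · subst h; rfl
    · exact (List.pairwise_iff_getElem.mp hpw) p q hp hq h
  have hbs : bsLoop s lim 0 s.length = s.countP (fun v => decide (v ≤ lim)) := by
    apply bsLoop_eq s lim hmono s.length 0 s.length rfl (by omega) le_rfl
    · intro i hi; omega
    · intro i h1 h2; omega
  rw [hbs]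
  have hcp : s.countP (fun v => decide (v ≤ lim)) =
      part.countP (fun v => decide (v ≤ lim)) := hperm.countP_eq _
  have hlen : s.length = part.length := hperm.length_eq
  have hfl : (part.filter (fun v => decide (v > lim))).length =
      part.countP (fun v => decide (v > lim)) := List.countP_eq_length_filter.symm
  have hsum : part.length = part.countP (fun v => decide (v ≤ lim)) +
      part.countP (fun v => decide (v > lim)) := by
    have h0 := List.length_eq_countP_add_countP (p := fun v : Int => decide (v ≤ lim)) (l := part)
    have h1 : part.countP (fun a : Int => decide ¬(decide (a ≤ lim) = true)) =
        part.countP (fun v => decide (v > lim)) :=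
      List.countP_congr (fun a _ => by simp [not_le])
    rw [h0, h1]
  rw [hcp, hlen, hfl]
  omega

-- ===== VERDICT =====
theorem cal_acc_TE2_spec : Claim_equal_cal_acc_TE2 := by
  intro xs lim _
  unfold Spec_cal_acc_TE2 cal_acc_TE2 cal_acc_TE2_alt
  dsimp only
  rw [calAccLoop_eq]
  rw [countAbove_eq, countAbove_eq]
  have h1 := length_filter_split (fun v => decide (v > lim)) (xs.take 161)
  have h2 := length_filter_split (fun v => decide (v > lim)) (xs.drop 161)
  have l1 := List.length_filter_le (fun v => decide (v > lim)) (xs.take 161)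
  have l2 := List.length_filter_le (fun v => decide (v > lim)) (xs.drop 161)
  simp only [Nat.sub_zero]
  refine Prod.ext ?_ (Prod.ext ?_ (Prod.ext ?_ ?_)) <;>
    simp only [zero_add] <;> omega
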